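-- pv_equiv track=rewrite | github.com/jJup0/LeetCode | Hard/2009. Minimum Number of Operations to Make Array Continuous.py | minOperations_sliding_window
-- ===== SOURCE A (Python) =====
-- def minOperations_sliding_window(nums: list[int]):
--     n = res = len(nums)
--     unique_sorted_nums = sorted(set(nums))
--     i, j = 0, 0
--     for i, num in enumerate(unique_sorted_nums):
--         while j < len(unique_sorted_nums) and unique_sorted_nums[j] - num < n:
--             j += 1
--         res = min(res, len(unique_sorted_nums) - (j - i))
--     return res
-- ===== SOURCE B (Python) =====
-- def _bisect_left(arr, t):
--     lo, hi = 0, len(arr)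
--     while lo < hi:
--         mid = (lo + hi) // 2
--         if arr[mid] < t:
--             lo = mid + 1
--         else:
--             hi = mid
--     return lo
--
-- def minOperations_sliding_window(nums: list[int]):
--     n = len(nums)
--     arr = sorted(set(nums))
--     m = len(arr)
--     return min([n] + [m - (_bisect_left(arr, num + n) - i) for i, num in enumerate(arr)])
-- ===== Notes on version B (the rewrite author's own statement) =====
-- stated objective: alternative
-- what changed: Replaces A's single sweep with a persistent monotonic pointer j by an independent hand-written binary search per distinct value (first index outside the window [num, num+n-1]) inside one min-comprehension, so no cross-iteration loop state is kept.
import Mathlib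
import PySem

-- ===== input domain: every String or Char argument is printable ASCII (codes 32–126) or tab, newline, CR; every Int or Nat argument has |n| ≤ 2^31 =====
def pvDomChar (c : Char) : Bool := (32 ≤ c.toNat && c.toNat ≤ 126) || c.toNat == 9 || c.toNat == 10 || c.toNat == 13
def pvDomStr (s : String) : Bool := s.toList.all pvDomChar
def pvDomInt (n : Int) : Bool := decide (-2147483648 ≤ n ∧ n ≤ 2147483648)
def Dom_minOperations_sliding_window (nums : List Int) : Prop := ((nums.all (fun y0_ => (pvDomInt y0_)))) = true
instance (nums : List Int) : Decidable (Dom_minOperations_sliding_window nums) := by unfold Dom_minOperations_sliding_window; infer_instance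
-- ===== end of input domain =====

-- B replaces A's persistent two-pointer sweep by an independent hand-written binary search per distinct value; alternative decomposition, no speed claim.

-- ===== PORT A =====
-- the inner 'while j < len(arr) and arr[j] - num < n: j += 1' loop of A
def pvAdvance (arr : List Int) (num n : Int) (j : Nat) : Nat :=
  if h : j < arr.length then
    if arr[j] - num < n then pvAdvance arr num n (j + 1) else j
  else j
termination_by arr.length - j

def minOperations_sliding_window (nums : List Int) : Int :=
  let n : Int := nums.length
  let arr : List Int := PySem.List.sorted (PySem.Set.ofList nums) (fun x => x) false
  let r := (PySem.List.enumerate arr 0).foldl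
    (fun (st : Nat × Int) (p : Int × Int) =>
      let j := pvAdvance arr p.2 n st.1
      (j, min st.2 ((arr.length : Int) - ((j : Int) - p.1))))
    (0, n)
  r.2

-- ===== PORT B =====
-- Source B's hand-written _bisect_left; 'arr.getD mid 0' ports the in-range index 'arr[mid]'
-- (exact here: mid < hi ≤ len(arr) at every call the algorithm makes)
def pvBisectLeft (arr : List Int) (t : Int) (lo hi : Nat) : Nat :=
  if h : lo < hi then
    let mid := (lo + hi) / 2
    if arr.getD mid 0 < t then pvBisectLeft arr t (mid + 1) hi
    else pvBisectLeft arr t lo mid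
  else lo
termination_by hi - lo
decreasing_by all_goals omega

def minOperations_sliding_window_alt (nums : List Int) : Int :=
  let n : Int := nums.length
  let arr : List Int := PySem.List.sorted (PySem.Set.ofList nums) (fun x => x) false
  let m : Int := arr.length
  ((PySem.List.enumerate arr 0).map (fun p =>
      m - ((pvBisectLeft arr (p.2 + n) 0 arr.length : Int) - p.1))).foldl min n

-- ===== PRECONDITION & SPEC =====
def Spec_minOperations_sliding_window (nums : List Int) (out : Int) : Prop := out = minOperations_sliding_window_alt nums
instance (nums : List Int) (out : Int) : Decidable (Spec_minOperations_sliding_window nums out) := by unfold Spec_minOperations_sliding_window; infer_instance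

-- ===== CLAIM (what is proved, stated in full; the proofs are below) =====
def Claim_equal_minOperations_sliding_window : Prop := ∀ (nums : List Int), Dom_minOperations_sliding_window nums → Spec_minOperations_sliding_window nums (minOperations_sliding_window nums)

-- ===== LEMMAS AND PROOFS =====

-- number of elements of arr below a threshold
def pvCnt (arr : List Int) (t : Int) : Nat := arr.countP (fun x => decide (x < t))

lemma pvCnt_le_length (arr : List Int) (t : Int) : pvCnt arr t ≤ arr.length :=
  List.countP_le_length

lemma pvCnt_mono (arr : List Int) {s t : Int} (h : s ≤ t) : pvCnt arr s ≤ pvCnt arr t := by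
  apply List.countP_mono_left
  intro x _ hx
  simp only [decide_eq_true_eq] at *
  omega

-- on a (≤)-sorted list, an element < t at index j forces at least j+1 elements below t
lemma pvCnt_ge (arr : List Int) (t : Int) (hs : arr.Pairwise (· ≤ ·)) (j : Nat)
    (hj : j < arr.length) (hlt : arr[j] < t) : j + 1 ≤ pvCnt arr t := by
  have hsplit : arr = arr.take (j + 1) ++ arr.drop (j + 1) := (List.take_append_drop _ _).symm
  have hall : ∀ x ∈ arr.take (j + 1), decide (x < t) = true := by
    intro x hx
    obtain ⟨k, hk, hkx⟩ := List.getElem_of_mem hx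
    have hk' : k < j + 1 := lt_of_lt_of_le hk (by simp)
    have hkarr : k < arr.length := by
      have h2 := List.length_take (i := j + 1) (l := arr)
      omega
    have hx' : x = arr[k] := by
      rw [← hkx]; exact List.getElem_take
    rw [hx']
    rcases Nat.lt_or_ge k j with h | h
    · have := (List.pairwise_iff_getElem.mp hs) k j hkarr hj h
      simp only [decide_eq_true_eq]; omega
    · have : k = j := by omega
      subst this
      simp only [decide_eq_true_eq]; omega
  have htlen : (arr.take (j + 1)).length = j + 1 := by
    simp [List.length_take]; omega
  have : pvCnt arr t = (arr.take (j + 1)).countP (fun x => decide (x < t))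
      + (arr.drop (j + 1)).countP (fun x => decide (x < t)) := by
    unfold pvCnt
    conv_lhs => rw [hsplit]
    exact List.countP_append ..
  have h1 : (arr.take (j + 1)).countP (fun x => decide (x < t)) = j + 1 := by
    rw [List.countP_eq_length.mpr hall, htlen]
  omega

-- on a (≤)-sorted list, an element ≥ t at index j bounds the count by j
lemma pvCnt_le (arr : List Int) (t : Int) (hs : arr.Pairwise (· ≤ ·)) (j : Nat)
    (hj : j < arr.length) (hge : t ≤ arr[j]) : pvCnt arr t ≤ j := by
  have hdrop : arr.drop j = arr[j] :: arr.drop (j + 1) := List.drop_eq_getElem_cons hj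
  have hpw : (arr.drop j).Pairwise (· ≤ ·) := hs.sublist (List.drop_sublist j arr)
  have hall : ∀ x ∈ arr.drop j, ¬ (decide (x < t) = true) := by
    intro x hx
    rw [hdrop] at hx hpw
    simp only [List.mem_cons] at hx
    rcases hx with rfl | hx
    · simp only [decide_eq_true_eq]; omega
    · have := (List.pairwise_cons.mp hpw).1 x hx
      simp only [decide_eq_true_eq]; omega
  have hzero : (arr.drop j).countP (fun x => decide (x < t)) = 0 :=
    List.countP_eq_zero.mpr hall
  have hsplit : pvCnt arr t = (arr.take j).countP (fun x => decide (x < t))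
      + (arr.drop j).countP (fun x => decide (x < t)) := by
    unfold pvCnt
    conv_lhs => rw [(List.take_append_drop j arr).symm]
    exact List.countP_append ..
  have h1 : (arr.take j).countP (fun x => decide (x < t)) ≤ j := by
    calc _ ≤ (arr.take j).length := List.countP_le_length
    _ ≤ j := by simp [List.length_take]
  omega

-- the while loop lands exactly on the count of elements below num + n
lemma pvAdvance_eq (arr : List Int) (num n : Int) (hs : arr.Pairwise (· ≤ ·)) :
    ∀ j, j ≤ pvCnt arr (num + n) → pvAdvance arr num n j = pvCnt arr (num + n) := by
  intro j
  induction hd : arr.length - j using Nat.strong_induction_on generalizing j with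
  | _ d ih =>
    intro hj
    rw [pvAdvance]
    by_cases hlen : j < arr.length
    · simp only [hlen, dif_pos]
      by_cases hlt : arr[j] - num < n
      · simp only [hlt, if_pos]
        have hj1 : j + 1 ≤ pvCnt arr (num + n) :=
          pvCnt_ge arr (num + n) hs j hlen (by omega)
        exact ih (arr.length - (j + 1)) (by omega) (j + 1) rfl hj1
      · simp only [hlt, if_neg, not_false_iff]
        have := pvCnt_le arr (num + n) hs j hlen (by omega)
        omega
    · simp only [hlen, dif_neg, not_false_iff]
      have := pvCnt_le_length arr (num + n)
      omega

-- the binary search lands exactly on the count of elements below t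
lemma pvBisectLeft_eq (arr : List Int) (t : Int) (hs : arr.Pairwise (· ≤ ·)) :
    ∀ lo hi, hi ≤ arr.length → lo ≤ pvCnt arr t → pvCnt arr t ≤ hi →
      pvBisectLeft arr t lo hi = pvCnt arr t := by
  intro lo hi
  induction hd : hi - lo using Nat.strong_induction_on generalizing lo hi with
  | _ d ih =>
    intro hhi hlo hc
    rw [pvBisectLeft]
    by_cases hlt : lo < hi
    · simp only [hlt, dif_pos]
      have hmid : (lo + hi) / 2 < arr.length := by omega
      have hget : arr.getD ((lo + hi) / 2) 0 = arr[(lo + hi) / 2] := List.getD_eq_getElem _ _ hmid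
      by_cases hx : arr[(lo + hi) / 2] < t
      · rw [hget]
        simp only [hx, if_pos]
        have := pvCnt_ge arr t hs ((lo + hi) / 2) hmid hx
        exact ih (hi - ((lo + hi) / 2 + 1)) (by omega) _ hi rfl hhi (by omega) hc
      · rw [hget]
        simp only [hx, if_neg, not_false_iff]
        have := pvCnt_le arr t hs ((lo + hi) / 2) hmid (by omega)
        exact ih ((lo + hi) / 2 - lo) (by omega) lo _ rfl (by omega) hlo (by omega)
    · simp only [hlt, dif_neg, not_false_iff]
      omega

-- A's fold with the two-pointer state computes the same running min as the per-element counts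
lemma pvFoldA (arr : List Int) (n : Int) (hs : arr.Pairwise (· ≤ ·)) :
    ∀ (l : List (Int × Int)) (j0 : Nat) (res0 : Int),
      l.Pairwise (fun p q => p.2 ≤ q.2) →
      (∀ p ∈ l, j0 ≤ pvCnt arr (p.2 + n)) →
      (l.foldl
        (fun (st : Nat × Int) (p : Int × Int) =>
          let j := pvAdvance arr p.2 n st.1
          (j, min st.2 ((arr.length : Int) - ((j : Int) - p.1))))
        (j0, res0)).2
      = (l.map (fun p => (arr.length : Int) - (((pvCnt arr (p.2 + n)) : Int) - p.1))).foldl min res0 := by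
  intro l
  induction l with
  | nil => intro j0 res0 _ _; rfl
  | cons p t ih =>
    intro j0 res0 hpw hmem
    have hadv : pvAdvance arr p.2 n j0 = pvCnt arr (p.2 + n) :=
      pvAdvance_eq arr p.2 n hs j0 (hmem p List.mem_cons_self)
    simp only [List.foldl_cons, List.map_cons, hadv]
    exact ih (pvCnt arr (p.2 + n)) _ (List.pairwise_cons.mp hpw).2
      (fun q hq => by
        have hle2 : p.2 ≤ q.2 := (List.pairwise_cons.mp hpw).1 q hq
        exact pvCnt_mono arr (by omega))

-- enumerate of a (≤)-sorted list has (≤)-sorted second components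
lemma pvEnumPairwise (xs : List Int) (h : xs.Pairwise (· ≤ ·)) :
    (PySem.List.enumerate xs 0).Pairwise (fun p q : Int × Int => p.2 ≤ q.2) := by
  rw [List.pairwise_iff_getElem] at h ⊢
  intro i j hi hj hij
  simp only [PySem.List.length_enumerate] at hi hj
  simp only [PySem.List.getElem_enumerate]
  exact h i j hi hj hij

-- ===== VERDICT (by name: the statement is the Claim_ definition above) =====
theorem minOperations_sliding_window_spec : Claim_equal_minOperations_sliding_window := by
  intro nums _
  unfold Spec_minOperations_sliding_window minOperations_sliding_window
    minOperations_sliding_window_alt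
  simp only []
  have hstrict : (PySem.List.sorted (PySem.Set.ofList nums) (fun x => x) false).Pairwise
      (· < ·) := PySem.List.sorted_ofList_pairwise_lt nums
  generalize harr : PySem.List.sorted (PySem.Set.ofList nums) (fun x => x) false = arr at *
  have hle : arr.Pairwise (· ≤ ·) := hstrict.imp le_of_lt
  have h0n : (0 : Int) ≤ (nums.length : Int) := Int.natCast_nonneg _
  rw [pvFoldA arr (nums.length : Int) hle (PySem.List.enumerate arr 0) 0 (nums.length : Int)
    (pvEnumPairwise arr hle) (fun p _ => Nat.zero_le _)]
  congr 1
  apply List.map_congr_left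
  intro p _
  rw [pvBisectLeft_eq arr (p.2 + (nums.length : Int)) hle 0 arr.length le_rfl
    (Nat.zero_le _) (pvCnt_le_length arr _)]
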